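-- pv_equiv track=rewrite | github.com/youngseo9603/coding_test | 프로그래머스/lv0/120922. 종이 자르기/종이 자르기.py | solution
-- ===== SOURCE A (Python) =====
-- def solution(M, N):
--     answer = 0
--
--     b = max(M,N)
--     s = min(M,N)
--
--     for i in range(s-1):
--         answer += 1
--
--     for i in range(s):
--         for j in range(b-1):
--             answer += 1
--
--     return answer
-- ===== SOURCE B (Python) =====
-- def solution(M, N):
--     s, b = sorted((M, N))
--     return s * b - 1 if s >= 1 else 0
-- ===== Notes on version B (the rewrite author's own statement) =====
-- stated objective: faster
-- what changed: Replaces the counting loops with the closed-form M*N - 1 (0 when a dimension is nonpositive, where A's ranges are empty).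
import Mathlib
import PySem

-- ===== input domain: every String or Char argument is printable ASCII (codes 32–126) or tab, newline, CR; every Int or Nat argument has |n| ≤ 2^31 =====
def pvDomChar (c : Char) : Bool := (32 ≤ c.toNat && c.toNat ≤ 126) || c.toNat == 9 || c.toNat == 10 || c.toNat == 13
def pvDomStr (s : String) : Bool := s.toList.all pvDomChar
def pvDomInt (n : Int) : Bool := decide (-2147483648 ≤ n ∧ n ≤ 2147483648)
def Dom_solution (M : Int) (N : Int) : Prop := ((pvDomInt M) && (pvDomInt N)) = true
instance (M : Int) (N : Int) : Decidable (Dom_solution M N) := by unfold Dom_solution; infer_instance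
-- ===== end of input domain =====

-- ===== PORT A =====
-- B replaces A's counting loops by the closed form s*b - 1 (0 for a nonpositive dimension); objective: faster.
def solution (M : Int) (N : Int) : Int :=
  let b := max M N
  let s := min M N
  let answer : Int := (PySem.List.pyRange 0 (s - 1) 1).foldl (fun a _ => a + 1) 0
  (PySem.List.pyRange 0 s 1).foldl
    (fun a _ => (PySem.List.pyRange 0 (b - 1) 1).foldl (fun a2 _ => a2 + 1) a) answer

-- ===== PORT B =====
def solution_alt (M : Int) (N : Int) : Int :=
  let s := min M N
  let b := max M N
  if 1 ≤ s then s * b - 1 else 0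

-- ===== PRECONDITION & SPEC =====
def Spec_solution (M : Int) (N : Int) (out : Int) : Prop := out = solution_alt M N
instance (M : Int) (N : Int) (out : Int) : Decidable (Spec_solution M N out) := by unfold Spec_solution; infer_instance

-- ===== CLAIM (what is proved, stated in full; the proofs are below) =====
def Claim_equal_solution : Prop := ∀ (M : Int) (N : Int), Dom_solution M N → Spec_solution M N (solution M N)

-- ===== LEMMAS AND PROOFS =====
theorem pv_foldl_add_one (l : List Int) (init : Int) :
    l.foldl (fun a _ => a + 1) init = init + l.length := by
  induction l generalizing init with
  | nil => simp
  | cons x xs ih => simp [List.foldl, ih]; omega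

theorem pv_foldl_const_of (f : Int → Int → Int) (c : Int)
    (h : ∀ a x, f a x = a + c) (l : List Int) (init : Int) :
    l.foldl f init = init + c * l.length := by
  induction l generalizing init with
  | nil => simp
  | cons x xs ih =>
    simp only [List.foldl, ih, h, List.length_cons]
    push_cast
    ring

-- ===== VERDICT (by name: the statement is the Claim_ definition above) =====
theorem solution_spec : Claim_equal_solution := by
  intro M N _
  unfold Spec_solution solution solution_alt
  simp only []
  set b := max M N with hb
  set s := min M N with hs
  have hsb : s ≤ b := min_le_max
  have h1 : (PySem.List.pyRange 0 (s - 1) 1).foldl (fun a _ => a + 1) 0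
      = ((s - 1).toNat : Int) := by
    rw [pv_foldl_add_one]; simp [PySem.List.length_pyRange_one]
  have h2 : (PySem.List.pyRange 0 s 1).foldl
      (fun a _ => (PySem.List.pyRange 0 (b - 1) 1).foldl (fun a2 _ => a2 + 1) a)
      (((s - 1).toNat : Int))
      = ((s - 1).toNat : Int) + ((b - 1).toNat : Int) * ((s.toNat : Int)) := by
    rw [pv_foldl_const_of _ ((b - 1).toNat : Int)
      (fun a _ => by rw [pv_foldl_add_one]; simp [PySem.List.length_pyRange_one])]
    simp [PySem.List.length_pyRange_one]
  rw [h1, h2]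
  by_cases hpos : 1 ≤ s
  · have hb1 : 1 ≤ b := le_trans hpos hsb
    rw [if_pos hpos]
    rw [Int.toNat_of_nonneg (by omega), Int.toNat_of_nonneg (by omega),
        Int.toNat_of_nonneg (by omega)]
    ring
  · rw [if_neg hpos]
    have h3 : (s - 1).toNat = 0 := by omega
    have hs0 : s.toNat = 0 := by omega
    simp [h3, hs0]
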